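-- pv_equiv track=rewrite | github.com/RajHarry/Resume-Analytics | App/utility_functions.py | remove_symb_except_numbers
-- ===== SOURCE A (Python) =====
-- import string as string_func
--
-- invalidChars = set(string_func.punctuation)
--
-- def remove_symb_except_numbers(string):
--     string = string.replace("&"," and ")
--     for i in invalidChars:
--         if(i != '.'):
--             if(i in string):
--                 string = string.replace(i," ")
--         else:
--             pass
--     return string
-- ===== SOURCE B (Python) =====
-- import string as string_func
--
-- def remove_symb_except_numbers(string):
--     out = []
--     for c in string:
--         if c == '&':
--             out.append(' and ')
--         elif c in string_func.punctuation and c != '.':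
--             out.append(' ')
--         else:
--             out.append(c)
--     return ''.join(out)
-- ===== Notes on version B (the rewrite author's own statement) =====
-- stated objective: simpler
-- what changed: A does one whole-string replace pass per punctuation character (one scan for each of the 32 symbols); B makes a single character-by-character scan, emitting ' and ' for '&', a space for other non-dot punctuation, and the character itself otherwise.
import Mathlib
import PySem

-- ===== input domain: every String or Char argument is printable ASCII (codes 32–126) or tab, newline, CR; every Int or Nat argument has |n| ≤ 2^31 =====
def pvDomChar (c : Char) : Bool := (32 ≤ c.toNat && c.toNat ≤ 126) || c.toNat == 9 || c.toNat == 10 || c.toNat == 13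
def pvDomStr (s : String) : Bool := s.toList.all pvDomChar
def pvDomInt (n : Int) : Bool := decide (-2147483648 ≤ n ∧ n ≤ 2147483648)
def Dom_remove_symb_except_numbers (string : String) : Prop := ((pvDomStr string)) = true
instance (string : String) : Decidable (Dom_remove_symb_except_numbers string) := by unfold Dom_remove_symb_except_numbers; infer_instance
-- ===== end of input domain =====

-- B replaces A's 32 whole-string replace passes (one per punctuation symbol) by a single
-- character-by-character scan building the output in one pass; same return value (objective: simpler).

-- ===== PORT A =====
-- invalidChars = set(string.punctuation). Python's set iteration order is unspecified, but the
-- per-character replacements are independent, so the punctuation string's own order is used here.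
def pvInvalidChars : PySem.Set Char :=
  PySem.Set.ofList ("!\"#$%&'()*+,-./:;<=>?@[\\]^_`{|}~".toList)

def remove_symb_except_numbers (string : String) : String :=
  let s0 := PySem.Str.replace string "&" " and "
  pvInvalidChars.foldl (fun s i =>
    if i ≠ '.' then
      (if PySem.Str.isIn (String.ofList [i]) s then PySem.Str.replace s (String.ofList [i]) " " else s)
    else s) s0

-- ===== PORT B =====
-- what Source B appends for one character: ' and ' for '&', ' ' for other non-dot punctuation, else the char
def pvReplChar (c : Char) : List Char :=
  if c = '&' then " and ".toList
  else if c ∈ "!\"#$%&'()*+,-./:;<=>?@[\\]^_`{|}~".toList ∧ c ≠ '.' then [' ']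
  else [c]

def remove_symb_except_numbers_alt (string : String) : String :=
  String.ofList (string.toList.flatMap pvReplChar)

-- ===== PRECONDITION & SPEC =====
def Spec_remove_symb_except_numbers (string : String) (out : String) : Prop := out = remove_symb_except_numbers_alt string
instance (string : String) (out : String) : Decidable (Spec_remove_symb_except_numbers string out) := by unfold Spec_remove_symb_except_numbers; infer_instance

-- ===== CLAIM (what is proved, stated in full; the proofs are below) =====
def Claim_equal_remove_symb_except_numbers : Prop := ∀ (string : String), Dom_remove_symb_except_numbers string → Spec_remove_symb_except_numbers string (remove_symb_except_numbers string)

-- ===== LEMMAS AND PROOFS =====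
theorem pv_replace_go_single (c : Char) (r : List Char) :
    ∀ (fuel : Nat) (l acc : List Char), l.length ≤ fuel →
      PySem.Chars.replace.go [c] r fuel l acc
        = acc.reverse ++ l.flatMap (fun x => if x = c then r else [x]) := by
  intro fuel
  induction fuel with
  | zero =>
    intro l acc h
    have : l = [] := List.eq_nil_of_length_eq_zero (Nat.le_zero.mp h)
    subst this
    simp [PySem.Chars.replace.go]
  | succ n ih =>
    intro l acc h
    cases l with
    | nil => simp [PySem.Chars.replace.go]
    | cons x t =>
      by_cases hx : x = c
      · subst hx
        have hp : List.isPrefixOf [x] (x :: t) = true := by simp [List.isPrefixOf]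
        rw [PySem.Chars.replace.go]
        simp only [hp, if_pos, List.length_cons, List.length_nil, List.drop_succ_cons, List.drop_zero]
        rw [ih t (r.reverse ++ acc) (by simpa using Nat.le_of_succ_le_succ h)]
        simp
      · have hp : List.isPrefixOf [c] (x :: t) = false := by
          simp [List.isPrefixOf]; exact fun h => absurd h.symm hx
        rw [PySem.Chars.replace.go]
        simp only [hp]
        rw [ih t (x :: acc) (by simpa using Nat.le_of_succ_le_succ h)]
        simp [hx]

theorem pv_replace_single (c : Char) (r l : List Char) :
    PySem.Chars.replace l [c] r = l.flatMap (fun x => if x = c then r else [x]) := by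
  rw [PySem.Chars.replace]
  simp [pv_replace_go_single c r l.length l [] le_rfl]

def pvSub (i x : Char) : Char := if x = i then ' ' else x

theorem pv_flatMap_space (i : Char) (l : List Char) :
    l.flatMap (fun x => if x = i then [' '] else [x]) = l.map (pvSub i) := by
  induction l with
  | nil => rfl
  | cons x t ih => simp only [List.flatMap_cons, List.map_cons, ih, pvSub]; split <;> simp_all

theorem pv_map_sub_of_not_mem (i : Char) (l : List Char) (hmem : i ∉ l) :
    l.map (pvSub i) = l := by
  induction l with
  | nil => rfl
  | cons x t ih =>
    simp only [List.mem_cons, not_or] at hmem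
    simp only [List.map_cons, pvSub, ih hmem.2]
    rw [if_neg (fun hx => hmem.1 hx.symm)]

theorem pv_step_eq_map (l : List Char) (i : Char) :
    (if i ≠ '.' then
       (if PySem.Chars.isIn [i] l then PySem.Chars.replace l [i] [' '] else l)
     else l)
      = if i = '.' then l else l.map (pvSub i) := by
  by_cases hd : i = '.'
  · simp [hd]
  · simp only [hd, ne_eq, not_false_iff, if_true, if_false]
    by_cases hin : PySem.Chars.isIn [i] l
    · rw [if_pos hin, pv_replace_single, pv_flatMap_space]
    · rw [if_neg hin]
      have hmem : i ∉ l := by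
        intro hm
        obtain ⟨s, t, rfl⟩ := List.append_of_mem hm
        have hinf : [i] <:+: s ++ i :: t := ⟨s, t, by simp⟩
        exact hin ((PySem.Chars.isIn_iff_infix _ _).mpr hinf)
      exact (pv_map_sub_of_not_mem i l hmem).symm

theorem pv_foldl_map (L : List Char) :
    ∀ l0 : List Char,
      L.foldl (fun l i => if i = '.' then l else l.map (pvSub i)) l0
        = l0.map (fun x => L.foldl (fun y i => if i = '.' then y else pvSub i y) x) := by
  induction L with
  | nil => intro l0; simp
  | cons i L' ih =>
    intro l0
    by_cases hd : i = '.'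
    · simp only [List.foldl_cons, if_pos hd, ih]
    · simp only [List.foldl_cons, if_neg hd, ih, List.map_map]
      rfl

theorem pv_inner_eq (L : List Char) (hsp : ' ' ∉ L) (x : Char) :
    L.foldl (fun y i => if i = '.' then y else pvSub i y) x
      = if x ∈ L ∧ x ≠ '.' then ' ' else x := by
  induction L generalizing x with
  | nil => simp
  | cons i L' ih =>
    simp only [List.mem_cons, not_or] at hsp
    simp only [List.foldl_cons, List.mem_cons]
    by_cases hd : i = '.'
    · rw [if_pos hd, ih hsp.2]
      by_cases hx : x = i
      · subst hx; simp [hd]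
      · simp [hx]
    · rw [if_neg hd]
      by_cases hx : x = i
      · have hstep : pvSub i x = ' ' := by simp [pvSub, hx]
        rw [hstep, ih hsp.2]
        rw [if_neg (by intro h; exact hsp.2 h.1)]
        simp [hx, hd]
      · have hstep : pvSub i x = x := by simp [pvSub, hx]
        rw [hstep, ih hsp.2]
        simp [hx]

theorem pv_foldl_str (L : List Char) :
    ∀ s : String,
      (L.foldl (fun s i =>
        if i ≠ '.' then
          (if PySem.Str.isIn (String.ofList [i]) s then PySem.Str.replace s (String.ofList [i]) " " else s)
        else s) s).toList
      = L.foldl (fun l i =>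
          if i ≠ '.' then
            (if PySem.Chars.isIn [i] l then PySem.Chars.replace l [i] [' '] else l)
          else l) s.toList := by
  induction L with
  | nil => intro s; rfl
  | cons i L' ih =>
    intro s
    simp only [List.foldl_cons, ih]
    congr 1
    by_cases hd : i = '.'
    · simp [hd]
    · simp only [hd, ne_eq, not_false_iff, if_true]
      rw [PySem.Str.isIn_eq, String.toList_ofList]
      by_cases hin : PySem.Chars.isIn [i] s.toList
      · simp [hin, PySem.Str.toList_replace]
      · simp [hin]

theorem pv_point (c : Char) :
    ((if c = '&' then " and ".toList else [c]).map
      (fun x => if x ∈ pvInvalidChars ∧ x ≠ '.' then ' ' else x)) = pvReplChar c := by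
  by_cases hc : c = '&'
  · subst hc; decide
  · rw [if_neg hc]
    unfold pvReplChar
    rw [if_neg hc]
    have hm : (c ∈ pvInvalidChars) = (c ∈ "!\"#$%&'()*+,-./:;<=>?@[\\]^_`{|}~".toList) := by
      rfl
    simp only [List.map_cons, List.map_nil]
    by_cases hcc : c ∈ pvInvalidChars ∧ c ≠ '.'
    · rw [if_pos hcc, if_pos (by rw [← hm]; exact hcc)]
    · rw [if_neg hcc, if_neg (by rw [← hm] at *; exact hcc)]

theorem pv_main (string : String) :
    remove_symb_except_numbers string = remove_symb_except_numbers_alt string := by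
  have key : (remove_symb_except_numbers string).toList = string.toList.flatMap pvReplChar := by
    simp only [remove_symb_except_numbers]
    rw [pv_foldl_str, PySem.Str.toList_replace]
    have h0 : ("&" : String).toList = ['&'] := by decide
    rw [h0, pv_replace_single]
    have hstep : (fun (l : List Char) (i : Char) =>
        if i ≠ '.' then
          (if PySem.Chars.isIn [i] l then PySem.Chars.replace l [i] [' '] else l)
        else l)
        = fun l i => if i = '.' then l else l.map (pvSub i) := by
      funext l i; exact pv_step_eq_map l i
    rw [hstep, pv_foldl_map]
    have hsp : ' ' ∉ pvInvalidChars := by decide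
    have hinner : (fun x => pvInvalidChars.foldl
        (fun y i => if i = '.' then y else pvSub i y) x)
        = fun x => if x ∈ pvInvalidChars ∧ x ≠ '.' then ' ' else x := by
      funext x; exact pv_inner_eq _ hsp x
    rw [hinner, List.map_flatMap]
    have hpt : (fun c => ((if c = '&' then " and ".toList else [c]).map
        (fun x => if x ∈ pvInvalidChars ∧ x ≠ '.' then ' ' else x))) = pvReplChar :=
      funext pv_point
    rw [hpt]
  rw [← String.ofList_toList (s := remove_symb_except_numbers string), key]
  rfl

-- ===== VERDICT (by name: the statement is the Claim_ definition above) =====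
theorem remove_symb_except_numbers_spec : Claim_equal_remove_symb_except_numbers := by
  intro string _
  unfold Spec_remove_symb_except_numbers
  exact pv_main string
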